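-- pv_equiv track=rewrite | github.com/champakbhoomi/BRC | src/main.py | merge_city_data
-- ===== SOURCE A (Python) =====
-- def merge_city_data(data_list):
--     final_data = {}
--     for data in data_list:
--         for city, stats in data.items():
--             if city in final_data:
--                 final_stats = final_data[city]
--                 if stats[0] < final_stats[0]:
--                     final_stats[0] = stats[0]
--                 if stats[1] > final_stats[1]:
--                     final_stats[1] = stats[1]
--                 final_stats[2] += stats[2]
--                 final_stats[3] += stats[3]
--             else:
--                 final_data[city] = stats.copy()
--     return final_data
-- ===== SOURCE B (Python) =====
-- def merge_city_data(data_list):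
--     # Gather phase: group every stats list by city, first-occurrence order.
--     groups = {}
--     for data in data_list:
--         for city, stats in data.items():
--             groups.setdefault(city, []).append(stats)
--     # Reduce phase: fold each group into a copy of its first stats list.
--     result = {}
--     for city, group in groups.items():
--         base = group[0].copy()
--         for s in group[1:]:
--             base[:4] = [min(base[0], s[0]), max(base[1], s[1]),
--                         base[2] + s[2], base[3] + s[3]]
--         result[city] = base
--     return result
-- ===== Notes on version B (the rewrite author's own statement) =====
-- stated objective: alternative
-- what changed: B separates the work into a gather phase (a dict from city to the list of all its stats lists, in first-occurrence order) and a reduce phase that folds each group into a copy of its first list using min/max builtins and one slice assignment, instead of A's single pass interleaving membership tests with in-place field-by-field updates.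
import Mathlib
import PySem

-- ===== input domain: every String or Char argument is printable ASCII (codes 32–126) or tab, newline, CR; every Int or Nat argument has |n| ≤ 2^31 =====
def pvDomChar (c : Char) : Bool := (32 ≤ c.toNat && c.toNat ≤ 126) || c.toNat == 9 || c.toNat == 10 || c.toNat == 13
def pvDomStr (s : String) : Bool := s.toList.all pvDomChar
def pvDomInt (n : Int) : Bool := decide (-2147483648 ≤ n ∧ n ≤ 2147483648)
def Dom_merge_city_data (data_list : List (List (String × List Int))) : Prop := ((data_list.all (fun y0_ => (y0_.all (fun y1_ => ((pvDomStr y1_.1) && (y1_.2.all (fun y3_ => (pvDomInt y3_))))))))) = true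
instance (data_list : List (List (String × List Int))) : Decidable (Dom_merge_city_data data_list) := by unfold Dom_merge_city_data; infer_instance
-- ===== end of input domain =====

-- B splits A's interleaved merge into a gather phase (dict city -> list of stats lists)
-- and a reduce phase folding each group with min/max and one slice assignment (objective: alternative decomposition, not faster).

-- ===== PORT A =====
-- dict lookup: first match (Python dicts keep one entry per key; assoc-list first match is exact)
def pvLookup {ν : Type} (d : List (String × ν)) (c : String) : Option ν :=
  match d with
  | [] => none
  | (k, v) :: t => if k = c then some v else pvLookup t c

-- dict assignment d[c] = v: overwrite in place, new keys append (exact Python dict semantics)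
def pvStore {ν : Type} (d : List (String × ν)) (c : String) (v : ν) : List (String × ν) :=
  match d with
  | [] => [(c, v)]
  | (k, w) :: t => if k = c then (k, v) :: t else (k, w) :: pvStore t c v

-- one iteration of A's inner loop; indexed reads use List.getD and writes List.set,
-- exact for the in-range indices admitted by Pre_merge_city_data
def pvMergeOne (final_data : List (String × List Int)) (city : String) (stats : List Int) :
    List (String × List Int) :=
  match pvLookup final_data city with
  | some final_stats =>
    let fs1 := if stats.getD 0 0 < final_stats.getD 0 0 then final_stats.set 0 (stats.getD 0 0) else final_stats
    let fs2 := if stats.getD 1 0 > fs1.getD 1 0 then fs1.set 1 (stats.getD 1 0) else fs1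
    let fs3 := fs2.set 2 (fs2.getD 2 0 + stats.getD 2 0)
    let fs4 := fs3.set 3 (fs3.getD 3 0 + stats.getD 3 0)
    pvStore final_data city fs4
  | none => pvStore final_data city stats

def merge_city_data (data_list : List (List (String × List Int))) : List (String × List Int) :=
  data_list.foldl (fun final_data data =>
    data.foldl (fun final_data p => pvMergeOne final_data p.1 p.2) final_data) []

-- ===== PORT B =====
-- groups.setdefault(city, []).append(stats): extend the group in place, or append a new one
def pvGatherOne (groups : List (String × List (List Int))) (city : String) (stats : List Int) :
    List (String × List (List Int)) :=
  match groups with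
  | [] => [(city, [stats])]
  | (k, g) :: t => if k = city then (k, g ++ [stats]) :: t else (k, g) :: pvGatherOne t city stats

-- base[:4] = [min(base[0],s[0]), max(base[1],s[1]), base[2]+s[2], base[3]+s[3]]
-- (slice assignment = new 4 elements ++ base[4:]; reads exact in range, as admitted by Pre_)
def pvStep (base s : List Int) : List Int :=
  [min (base.getD 0 0) (s.getD 0 0), max (base.getD 1 0) (s.getD 1 0),
   base.getD 2 0 + s.getD 2 0, base.getD 3 0 + s.getD 3 0] ++ base.drop 4

-- base = group[0].copy(); for s in group[1:]: …  (gather never builds an empty group)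
def pvReduce (group : List (List Int)) : List Int :=
  match group with
  | [] => []
  | base :: rest => rest.foldl pvStep base

-- result[city] = base over distinct cities in groups order = map over the groups
def merge_city_data_alt (data_list : List (List (String × List Int))) : List (String × List Int) :=
  let groups := data_list.foldl (fun groups data =>
    data.foldl (fun groups p => pvGatherOne groups p.1 p.2) groups) []
  groups.map (fun e => (e.1, pvReduce e.2))

-- ===== PRECONDITION & SPEC =====
-- Pre_ excludes exactly the inputs where A raises IndexError: whenever a city occurs in
-- more than one (city, stats) pair, A reads/writes indices 0..3 of every stats list of
-- that city, so all of them must have length ≥ 4.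
def Pre_merge_city_data (data_list : List (List (String × List Int))) : Prop :=
  ∀ p ∈ data_list.flatten,
    1 < data_list.flatten.countP (fun q => q.1 = p.1) → 4 ≤ p.2.length

instance (data_list : List (List (String × List Int))) : Decidable (Pre_merge_city_data data_list) := by
  unfold Pre_merge_city_data; infer_instance

def pvWitness_merge_city_data : (List (List (String × List Int))) :=
  [[("a", [1, 2, 3, 4]), ("b", [7])], [("a", [0, 5, 1, 1])]]

def Spec_merge_city_data (data_list : List (List (String × List Int))) (out : List (String × List Int)) : Prop := out = merge_city_data_alt data_list
instance (data_list : List (List (String × List Int))) (out : List (String × List Int)) : Decidable (Spec_merge_city_data data_list out) := by unfold Spec_merge_city_data; infer_instance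

-- ===== CLAIM (what is proved, stated in full; the proofs are below) =====
def Claim_equal_merge_city_data : Prop := ∀ (data_list : List (List (String × List Int))), Dom_merge_city_data data_list → Pre_merge_city_data data_list → Spec_merge_city_data data_list (merge_city_data data_list)

-- ===== LEMMAS AND PROOFS =====

-- the stats lists of a given city, in order
def pvSub (c : String) (ps : List (String × List Int)) : List (List Int) :=
  (ps.filter (fun q => q.1 = c)).map Prod.snd

theorem foldl_foldl_flatten {α β : Type} (f : β → α → β) :
    ∀ (L : List (List α)) (b : β),
      L.foldl (fun acc xs => xs.foldl f acc) b = L.flatten.foldl f b := by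
  intro L
  induction L with
  | nil => intro b; rfl
  | cons x t ih => intro b; simp [List.foldl_append, ih]

theorem pvLookup_map {ν μ : Type} (h : ν → μ) (d : List (String × ν)) (c : String) :
    pvLookup (d.map (fun e => (e.1, h e.2))) c = (pvLookup d c).map h := by
  induction d with
  | nil => rfl
  | cons e t ih => simp only [List.map, pvLookup]; split <;> simp [ih]

theorem pvStore_map {ν μ : Type} (h : ν → μ) (d : List (String × ν)) (c : String) (v : ν) :
    pvStore (d.map (fun e => (e.1, h e.2))) c (h v) = (pvStore d c v).map (fun e => (e.1, h e.2)) := by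
  induction d with
  | nil => rfl
  | cons e t ih => simp only [List.map, pvStore]; split <;> simp [ih]

theorem pvStore_of_none {ν : Type} (d : List (String × ν)) (c : String) (v : ν)
    (h : pvLookup d c = none) : pvStore d c v = d ++ [(c, v)] := by
  induction d with
  | nil => rfl
  | cons e t ih =>
    cases e with
    | mk k w =>
      simp only [pvLookup] at h
      simp only [pvStore]
      split
      · simp_all
      · simp_all

theorem pvGatherOne_of_some (G : List (String × List (List Int))) (c : String) (s : List Int)
    (g : List (List Int)) (h : pvLookup G c = some g) :
    pvGatherOne G c s = pvStore G c (g ++ [s]) := by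
  induction G with
  | nil => simp [pvLookup] at h
  | cons e t ih =>
    cases e with
    | mk k w =>
      simp only [pvLookup] at h
      simp only [pvGatherOne, pvStore]
      split
      · rename_i hk; rw [if_pos hk] at h; simp_all
      · rename_i hk; rw [if_neg hk] at h; simp_all

theorem pvStep_length (b s : List Int) : 4 ≤ (pvStep b s).length := by
  simp [pvStep]

theorem pvFold_length (rest : List (List Int)) :
    ∀ b : List Int, 4 ≤ b.length → 4 ≤ (rest.foldl pvStep b).length := by
  induction rest with
  | nil => intro b h; exact h
  | cons s t ih => intro b h; exact ih _ (by simpa using pvStep_length b s)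

-- A's conditional in-place updates equal B's rebuilt 4-prefix, for lists of length ≥ 4
theorem pvChain_eq_step (b s : List Int) (hb : 4 ≤ b.length) :
    (let fs1 := if s.getD 0 0 < b.getD 0 0 then b.set 0 (s.getD 0 0) else b
     let fs2 := if s.getD 1 0 > fs1.getD 1 0 then fs1.set 1 (s.getD 1 0) else fs1
     let fs3 := fs2.set 2 (fs2.getD 2 0 + s.getD 2 0)
     fs3.set 3 (fs3.getD 3 0 + s.getD 3 0)) = pvStep b s := by
  match b, hb with
  | x0 :: x1 :: x2 :: x3 :: t, _ =>
    simp only [pvStep, List.getD, List.set]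
    split_ifs <;> simp_all [List.set, min_def, max_def] <;> omega


theorem pvGatherOne_of_none (G : List (String × List (List Int))) (c : String) (s : List Int)
    (h : pvLookup G c = none) : pvGatherOne G c s = G ++ [(c, [s])] := by
  induction G with
  | nil => rfl
  | cons e t ih =>
    cases e with
    | mk k w =>
      simp only [pvLookup] at h
      simp only [pvGatherOne]
      split
      · simp_all
      · simp_all

theorem pvLookup_store {ν : Type} (d : List (String × ν)) (c c' : String) (v : ν) :
    pvLookup (pvStore d c v) c' = if c = c' then some v else pvLookup d c' := by
  induction d with
  | nil => simp [pvStore, pvLookup]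
  | cons e t ih =>
    cases e with
    | mk k w =>
      simp only [pvStore]
      split
      · subst_vars; simp only [pvLookup]; split <;> simp_all
      · rename_i hkc; simp only [pvLookup]; split
        · rename_i hk; subst hk; rw [if_neg (Ne.symm hkc)]
        · rw [ih]
  
theorem pvLookup_append {ν : Type} (d : List (String × ν)) (c c' : String) (v : ν) :
    pvLookup (d ++ [(c, v)]) c' = (pvLookup d c').or (if c = c' then some v else none) := by
  induction d with
  | nil => simp [pvLookup]
  | cons e t ih =>
    cases e with
    | mk k w => simp only [List.cons_append, pvLookup]; split <;> simp [ih]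

theorem pvReduce_append (g : List (List Int)) (s : List Int) (h : g ≠ []) :
    pvReduce (g ++ [s]) = pvStep (pvReduce g) s := by
  cases g with
  | nil => exact absurd rfl h
  | cons b rest => simp [pvReduce, List.foldl_append]

theorem pvSub_append (ps : List (String × List Int)) (c c' : String) (s : List Int) :
    pvSub c' (ps ++ [(c, s)]) = pvSub c' ps ++ (if c = c' then [s] else []) := by
  simp only [pvSub, List.filter_append, List.map_append]
  congr 1
  by_cases h : c = c' <;> simp [h]

-- main invariant, by reverse induction over the flattened pair list
theorem pvMain (ps : List (String × List Int))
    (hP : ∀ p ∈ ps, 1 < ps.countP (fun q => q.1 = p.1) → 4 ≤ p.2.length) :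
    (ps.foldl (fun G p => pvGatherOne G p.1 p.2) []).map (fun e => (e.1, pvReduce e.2))
        = ps.foldl (fun M p => pvMergeOne M p.1 p.2) []
    ∧ ∀ c, pvLookup (ps.foldl (fun G p => pvGatherOne G p.1 p.2) []) c
        = (if pvSub c ps = [] then none else some (pvSub c ps)) := by
  induction ps using List.reverseRecOn with
  | nil => exact ⟨rfl, fun c => rfl⟩
  | append_singleton ps p ih =>
    obtain ⟨c, s⟩ := p
    have hP' : ∀ q ∈ ps, 1 < ps.countP (fun r => r.1 = q.1) → 4 ≤ q.2.length := by
      intro q hq hcnt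
      refine hP q (List.mem_append_left _ hq) ?_
      rw [List.countP_append]
      omega
    obtain ⟨ihEq, ihLk⟩ := ih hP'
    simp only [List.foldl_append, List.foldl_cons, List.foldl_nil]
    cases h : pvLookup (ps.foldl (fun G p => pvGatherOne G p.1 p.2) []) c with
    | none =>
      have hsub : pvSub c ps = [] := by
        have hl := ihLk c; rw [h] at hl
        by_contra hne
        rw [if_neg hne] at hl; cases hl
      have hMnone : pvLookup (ps.foldl (fun M p => pvMergeOne M p.1 p.2) []) c = none := by
        rw [← ihEq, pvLookup_map, h]; rfl
      constructor
      · rw [pvGatherOne_of_none _ _ _ h, List.map_append, ihEq]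
        show _ = pvMergeOne _ c s
        rw [pvMergeOne, hMnone, pvStore_of_none _ _ _ hMnone]
        simp [pvReduce]
      · intro c'
        rw [pvGatherOne_of_none _ _ _ h, pvLookup_append, ihLk c', pvSub_append]
        by_cases hc : c = c'
        · subst hc; simp [hsub]
        · simp [hc]
    | some g =>
      have hl := ihLk c; rw [h] at hl
      have hgne : pvSub c ps ≠ [] := by
        intro he; rw [if_pos he] at hl; cases hl
      rw [if_neg hgne] at hl
      have hg : g = pvSub c ps := by injection hl
      -- head of the group is the first stats list of city c in ps; Pre_ gives it length ≥ 4
      have hb4 : 4 ≤ (pvReduce g).length := by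
        cases hgc : pvSub c ps with
        | nil => exact absurd hgc hgne
        | cons b rest =>
          have hbmem : b ∈ pvSub c ps := by rw [hgc]; exact List.mem_cons_self
          simp only [pvSub, List.mem_map, List.mem_filter] at hbmem
          obtain ⟨q, ⟨hqm, hqc⟩, hqb⟩ := hbmem
          have hq1 : q.1 = c := by simpa using hqc
          have hcnt : 0 < ps.countP (fun r => r.1 = c) :=
            List.countP_pos_iff.mpr ⟨q, hqm, by simp [hq1]⟩
          have hql : 4 ≤ q.2.length := by
            refine hP q (List.mem_append_left _ hqm) ?_
            have hEq : (ps ++ [(c, s)]).countP (fun r => r.1 = q.1)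
                = ps.countP (fun r => r.1 = c) + 1 := by
              simp [List.countP_append, hq1]
            rw [hEq]; omega
          rw [hg, hgc]
          exact pvFold_length rest b (by rw [← hqb]; exact hql)
      constructor
      · rw [pvGatherOne_of_some _ _ _ _ h]
        have hstore := pvStore_map pvReduce (ps.foldl (fun G p => pvGatherOne G p.1 p.2) []) c (g ++ [s])
        rw [← hstore, ihEq]
        show pvStore _ c (pvReduce (g ++ [s])) = pvMergeOne _ c s
        have hMg : pvLookup (ps.foldl (fun M p => pvMergeOne M p.1 p.2) []) c = some (pvReduce g) := by
          rw [← ihEq, pvLookup_map, h]; rfl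
        rw [pvMergeOne, hMg]
        rw [pvReduce_append g s (by rw [hg]; exact hgne)]
        rw [← pvChain_eq_step (pvReduce g) s hb4]
      · intro c'
        rw [pvGatherOne_of_some _ _ _ _ h, pvLookup_store, pvSub_append]
        by_cases hc : c = c'
        · subst hc
          have h1 : pvSub c ps ++ (if c = c then [s] else []) = pvSub c ps ++ [s] := by simp
          rw [h1, if_pos rfl, if_neg (by simp), hg]
        · have h1 : pvSub c' ps ++ (if c = c' then [s] else []) = pvSub c' ps := by simp [hc]
          rw [h1, if_neg hc, ihLk c']

theorem pvPre_flatten (data_list : List (List (String × List Int)))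
    (h : Pre_merge_city_data data_list) :
    ∀ p ∈ data_list.flatten,
      1 < data_list.flatten.countP (fun q => q.1 = p.1) → 4 ≤ p.2.length := h

-- ===== VERDICT (by name: the statement is the Claim_ definition above) =====
theorem merge_city_data_spec : Claim_equal_merge_city_data := by
  intro data_list _hDom hPre
  unfold Spec_merge_city_data merge_city_data merge_city_data_alt
  rw [foldl_foldl_flatten, foldl_foldl_flatten]
  exact ((pvMain data_list.flatten (pvPre_flatten data_list hPre)).1).symm
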